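-- pv_equiv track=rewrite | github.com/PXThanhLam/ECG-WhatDeepModelRealyLearn | DataProcessing/LoadTrainData.py | convert_dict_data_to_list
-- ===== SOURCE A (Python) =====
-- def convert_dict_data_to_list(data_patiences):
--     signals=[]
--     annos=[]
--     for patience in data_patiences:
--         signals.append(data_patiences[patience][0])
--         annos.append(data_patiences[patience][1])
--     signals = [[signal] for patience_signal in signals for signal in patience_signal]
--     annos   = [anno for patience_anno in annos for anno in patience_anno]
--     return signals,annos
-- ===== SOURCE B (Python) =====
-- def convert_dict_data_to_list(data_patiences):
--     # Divide-and-conquer: split the list of patient values in half, recurse on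
--     # each half, and concatenate the two results; a one-patient leaf wraps its
--     # signals and copies its annotations. Correct because flattening distributes
--     # over concatenation, so combining the halves' answers preserves order.
--     def go(vs):
--         if not vs:
--             return [], []
--         if len(vs) == 1:
--             sigs, anns = vs[0]
--             return [[s] for s in sigs], list(anns)
--         mid = len(vs) // 2
--         ls, la = go(vs[:mid])
--         rs, ra = go(vs[mid:])
--         return ls + rs, la + ra
--
--     return go(list(data_patiences.values()))
-- ===== Notes on version B (the rewrite author's own statement) =====
-- stated objective: alternative
-- what changed: Replaces A's collect-then-flatten staged comprehensions (with key lookups) by a divide-and-conquer recursion that splits the value list in half, recurses, and concatenates the halves' results, wrapping signals only at one-patient leaves.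
import Mathlib
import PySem

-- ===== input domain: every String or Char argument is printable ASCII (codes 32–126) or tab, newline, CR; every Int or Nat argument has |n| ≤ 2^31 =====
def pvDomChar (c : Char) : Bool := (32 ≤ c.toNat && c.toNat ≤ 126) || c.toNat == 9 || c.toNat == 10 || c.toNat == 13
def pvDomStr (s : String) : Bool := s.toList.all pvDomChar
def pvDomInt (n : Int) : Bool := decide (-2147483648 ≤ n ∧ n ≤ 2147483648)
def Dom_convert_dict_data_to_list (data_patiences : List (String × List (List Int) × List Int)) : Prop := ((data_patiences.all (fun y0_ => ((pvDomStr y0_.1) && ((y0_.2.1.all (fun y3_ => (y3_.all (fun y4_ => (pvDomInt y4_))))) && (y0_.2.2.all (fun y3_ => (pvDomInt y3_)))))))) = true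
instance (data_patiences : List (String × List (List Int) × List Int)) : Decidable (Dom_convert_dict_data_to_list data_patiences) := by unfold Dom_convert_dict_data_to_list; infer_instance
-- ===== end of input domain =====

-- ===== PORT A =====
-- B differs from A by a divide-and-conquer recursion over the value list instead of
-- A's collect-then-flatten staged comprehensions; objective: alternative (same output).
-- dict lookup data_patiences[patience]: first match in the association list (KeyError cannot occur: keys come from iteration)
def pyLookup (d : List (String × List (List Int) × List Int)) (k : String) : List (List Int) × List Int :=
  ((d.find? (fun p => p.1 == k)).map Prod.snd).getD ([], [])

def convert_dict_data_to_list (data_patiences : List (String × List (List Int) × List Int)) : List (List (List Int)) × List Int :=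
  let signals : List (List (List Int)) :=
    data_patiences.foldl (fun acc p => acc ++ [(pyLookup data_patiences p.1).1]) []
  let annos : List (List Int) :=
    data_patiences.foldl (fun acc p => acc ++ [(pyLookup data_patiences p.1).2]) []
  let signals2 : List (List (List Int)) :=
    signals.flatMap (fun patience_signal => patience_signal.map (fun signal => [signal]))
  let annos2 : List Int := annos.flatMap (fun patience_anno => patience_anno)
  (signals2, annos2)

-- ===== PORT B =====
-- divide-and-conquer helper go(vs) from Source B
def goAlt : List (List (List Int) × List Int) → List (List (List Int)) × List Int
  | [] => ([], [])
  | [v] => (v.1.map (fun s => [s]), v.2)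
  | a :: b :: t =>
    let mid := (a :: b :: t).length / 2
    let l := goAlt ((a :: b :: t).take mid)
    let r := goAlt ((a :: b :: t).drop mid)
    (l.1 ++ r.1, l.2 ++ r.2)
termination_by vs => vs.length
decreasing_by
  · simp [List.length_take]; omega
  · simp; omega

def convert_dict_data_to_list_alt (data_patiences : List (String × List (List Int) × List Int)) : List (List (List Int)) × List Int :=
  goAlt (data_patiences.map Prod.snd)

-- ===== PRECONDITION & SPEC =====
-- Pre_ requires distinct keys: the association list encodes a Python dict, whose keys are always
-- unique; a duplicate-key list represents no dict input A can receive (first-match lookup vs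
-- positional value would be ambiguous there).
def Pre_convert_dict_data_to_list (data_patiences : List (String × List (List Int) × List Int)) : Prop :=
  (data_patiences.map Prod.fst).Nodup
instance (data_patiences : List (String × List (List Int) × List Int)) : Decidable (Pre_convert_dict_data_to_list data_patiences) := by unfold Pre_convert_dict_data_to_list; infer_instance

def pvWitness_convert_dict_data_to_list : (List (String × List (List Int) × List Int)) :=
  [("p1", ([[1, 2], [3]], [7, 8])), ("p2", ([[4]], [9]))]

def Spec_convert_dict_data_to_list (data_patiences : List (String × List (List Int) × List Int)) (out : List (List (List Int)) × List Int) : Prop := out = convert_dict_data_to_list_alt data_patiences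
instance (data_patiences : List (String × List (List Int) × List Int)) (out : List (List (List Int)) × List Int) : Decidable (Spec_convert_dict_data_to_list data_patiences out) := by unfold Spec_convert_dict_data_to_list; infer_instance

-- ===== CLAIM (what is proved, stated in full; the proofs are below) =====
def Claim_equal_convert_dict_data_to_list : Prop := ∀ (data_patiences : List (String × List (List Int) × List Int)), Dom_convert_dict_data_to_list data_patiences → Pre_convert_dict_data_to_list data_patiences → Spec_convert_dict_data_to_list data_patiences (convert_dict_data_to_list data_patiences)

-- ===== LEMMAS AND PROOFS =====

-- a foldl that appends one element per step is a map
theorem foldl_append_singleton {α β : Type} (f : α → β) (l : List α) (init : List β) :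
    l.foldl (fun acc x => acc ++ [f x]) init = init ++ l.map f := by
  induction l generalizing init with
  | nil => simp
  | cons x xs ih => simp [List.foldl_cons, ih]

-- with distinct keys, looking a member's key up returns that member's value
theorem pyLookup_mem {d : List (String × List (List Int) × List Int)}
    (h : (d.map Prod.fst).Nodup) {p : String × List (List Int) × List Int} (hp : p ∈ d) :
    pyLookup d p.1 = p.2 := by
  induction d with
  | nil => cases hp
  | cons q qs ih =>
    simp only [List.map_cons, List.nodup_cons] at h
    rcases List.mem_cons.mp hp with rfl | hp'
    · simp [pyLookup]
    · have hne : q.1 ≠ p.1 := by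
        intro he
        exact h.1 (he ▸ List.mem_map_of_mem hp')
      have := ih h.2 hp'
      simpa [pyLookup, List.find?_cons, beq_iff_eq, hne] using this

-- the divide-and-conquer recursion computes the flattening, for any split
theorem goAlt_eq (vs : List (List (List Int) × List Int)) :
    goAlt vs = (vs.flatMap (fun v => v.1.map (fun s => [s])), vs.flatMap (fun v => v.2)) := by
  induction vs using goAlt.induct with
  | case1 => simp [goAlt]
  | case2 v => simp [goAlt]
  | case3 a b t mid ihl ihr =>
    rw [goAlt, ihl, ihr]
    dsimp only
    rw [← List.flatMap_append, ← List.flatMap_append,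
        List.take_append_drop]

-- ===== VERDICT (by name: the statement is the Claim_ definition above) =====
theorem convert_dict_data_to_list_spec : Claim_equal_convert_dict_data_to_list := by
  intro d _ hpre
  unfold Spec_convert_dict_data_to_list convert_dict_data_to_list convert_dict_data_to_list_alt
  dsimp only
  rw [foldl_append_singleton (fun p : String × List (List Int) × List Int => (pyLookup d p.1).1) d [],
      foldl_append_singleton (fun p : String × List (List Int) × List Int => (pyLookup d p.1).2) d [],
      goAlt_eq]
  simp only [List.nil_append, List.flatMap_map]
  exact Prod.ext
    (List.flatMap_congr (fun p hp => by rw [pyLookup_mem hpre hp]))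
    (List.flatMap_congr (fun p hp => by rw [pyLookup_mem hpre hp]))
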